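-- pv_equiv track=rewrite | github.com/tsmuskin/CS581-Final_Project | puzzle_coasters.py | define_edges
-- ===== SOURCE A (Python) =====
-- def opposite_edge(e):
--     if e == 'out':
--         return 'in'
--     elif e == 'in':
--         return 'out'
--     else:
--         return 'none'
--
-- def define_edges(rows, cols):
--     """
--        If not the rightmost column, right='out' in this block and left='in' in the next block.
--        If not the lowest line, the bottom='out this block is' out' and the top of the next block is' in'.
--        The uppermost and leftmost columns are set to' none'
--     """
--     edges_map = [[{"top": "none", "right": "none", "bottom": "none", "left": "none"}
--                   for _ in range(cols)] for _ in range(rows)]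
--
--     for r in range(rows):
--         for c in range(cols):
--
--             if r > 0:
--                 edges_map[r][c]["top"] = opposite_edge(edges_map[r - 1][c]["bottom"])
--             else:
--                 edges_map[r][c]["top"] = "none"
--
--             if c > 0:
--                 edges_map[r][c]["left"] = opposite_edge(edges_map[r][c - 1]["right"])
--             else:
--                 edges_map[r][c]["left"] = "none"
--
--             if c < cols - 1:
--                 edges_map[r][c]["right"] = "out"
--             else:
--                 edges_map[r][c]["right"] = "none"
--
--             if r < rows - 1:
--                 edges_map[r][c]["bottom"] = "out"
--             else:
--                 edges_map[r][c]["bottom"] = "none"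
--
--     return edges_map
-- ===== SOURCE B (Python) =====
-- def define_edges(rows, cols):
--     # Closed form: every interior edge is 'out' toward higher index and 'in' from lower index.
--     return [[{"top": "in" if r > 0 else "none",
--               "right": "out" if c < cols - 1 else "none",
--               "bottom": "out" if r < rows - 1 else "none",
--               "left": "in" if c > 0 else "none"}
--              for c in range(cols)]
--             for r in range(rows)]
-- ===== Notes on version B (the rewrite author's own statement) =====
-- stated objective: simpler
-- what changed: Replaced the mutate-in-place two-loop neighbor propagation (reading each cell's top/left from the previously finalized neighbor via opposite_edge) with a single comprehension computing each cell's four edges by a closed form of (r, c) alone; the opposite_edge helper and the pre-built mutable grid disappear.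
import Mathlib
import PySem

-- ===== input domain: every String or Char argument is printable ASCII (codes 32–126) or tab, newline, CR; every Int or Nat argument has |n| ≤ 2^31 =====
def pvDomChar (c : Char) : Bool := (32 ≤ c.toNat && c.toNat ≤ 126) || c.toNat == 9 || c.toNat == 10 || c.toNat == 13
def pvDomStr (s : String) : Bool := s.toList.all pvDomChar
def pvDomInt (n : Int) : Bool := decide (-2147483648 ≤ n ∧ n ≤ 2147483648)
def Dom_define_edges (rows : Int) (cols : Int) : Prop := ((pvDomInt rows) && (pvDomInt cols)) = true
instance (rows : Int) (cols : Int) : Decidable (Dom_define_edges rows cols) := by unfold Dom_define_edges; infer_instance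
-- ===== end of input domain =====

-- B replaces A's two-pass neighbour-propagation grid with a direct per-cell closed form (objective: simpler).

-- ===== PORT A =====
def opposite_edge (e : String) : String :=
  if e == "out" then "in"
  else if e == "in" then "out"
  else "none"

-- dict literal {"top": "none", …} in insertion order
def pvInitCell : List (String × String) :=
  [("top", "none"), ("right", "none"), ("bottom", "none"), ("left", "none")]

-- d[k] = v  (Python dict store; overwrite keeps position)
def pvDset (d : List (String × String)) (k v : String) : List (String × String) :=
  ((PySem.Dict.mk d).insert k v).items

-- d[k]  (in A every key looked up is present, so KeyError is impossible; default "" is never used)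
def pvDget (d : List (String × String)) (k : String) : String :=
  ((PySem.Dict.mk d).get? k).getD ""

-- edges_map[r][c]  (indices always in range in A; defaults never used)
def pvGetCell (g : List (List (List (String × String)))) (r c : Int) : List (String × String) :=
  PySem.List.pyGetD (PySem.List.pyGetD g r []) c []

-- edges_map[r][c] = cell
def pvSetCell (g : List (List (List (String × String)))) (r c : Int)
    (cell : List (String × String)) : List (List (List (String × String))) :=
  PySem.List.pySetD g r (PySem.List.pySetD (PySem.List.pyGetD g r []) c cell)

-- the body of A's double loop: the four in-place dict stores at cell (r, c), in A's order
def pvCellStep (rows cols : Int) (g : List (List (List (String × String)))) (r c : Int) :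
    List (List (List (String × String))) :=
  let g := pvSetCell g r c (pvDset (pvGetCell g r c) "top"
      (if r > 0 then opposite_edge (pvDget (pvGetCell g (r - 1) c) "bottom") else "none"))
  let g := pvSetCell g r c (pvDset (pvGetCell g r c) "left"
      (if c > 0 then opposite_edge (pvDget (pvGetCell g r (c - 1)) "right") else "none"))
  let g := pvSetCell g r c (pvDset (pvGetCell g r c) "right"
      (if c < cols - 1 then "out" else "none"))
  let g := pvSetCell g r c (pvDset (pvGetCell g r c) "bottom"
      (if r < rows - 1 then "out" else "none"))
  g

def define_edges (rows : Int) (cols : Int) : List (List (List (String × String))) :=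
  let edges_map := (PySem.List.pyRange 0 rows 1).map
    (fun _ => (PySem.List.pyRange 0 cols 1).map (fun _ => pvInitCell))
  (PySem.List.pyRange 0 rows 1).foldl (fun g r =>
    (PySem.List.pyRange 0 cols 1).foldl (fun g c => pvCellStep rows cols g r c) g) edges_map

-- ===== PORT B =====
def define_edges_alt (rows : Int) (cols : Int) : List (List (List (String × String))) :=
  (PySem.List.pyRange 0 rows 1).map (fun r =>
    (PySem.List.pyRange 0 cols 1).map (fun c =>
      [("top", if r > 0 then "in" else "none"),
       ("right", if c < cols - 1 then "out" else "none"),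
       ("bottom", if r < rows - 1 then "out" else "none"),
       ("left", if c > 0 then "in" else "none")]))

-- ===== PRECONDITION & SPEC =====
def Spec_define_edges (rows : Int) (cols : Int) (out : List (List (List (String × String)))) : Prop := out = define_edges_alt rows cols
instance (rows : Int) (cols : Int) (out : List (List (List (String × String)))) : Decidable (Spec_define_edges rows cols out) := by unfold Spec_define_edges; infer_instance

-- ===== CLAIM (what is proved, stated in full; the proofs are below) =====
def Claim_equal_define_edges : Prop := ∀ (rows : Int) (cols : Int), Dom_define_edges rows cols → Spec_define_edges rows cols (define_edges rows cols)

-- ===== LEMMAS AND PROOFS =====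

-- B's closed-form cell
def fcell (rows cols r c : Int) : List (String × String) :=
  [("top", if r > 0 then "in" else "none"),
   ("right", if c < cols - 1 then "out" else "none"),
   ("bottom", if r < rows - 1 then "out" else "none"),
   ("left", if c > 0 then "in" else "none")]

def frow (rows cols r : Int) : List (List (String × String)) :=
  (PySem.List.pyRange 0 cols 1).map (fcell rows cols r)

def irow (cols : Int) : List (List (String × String)) :=
  (PySem.List.pyRange 0 cols 1).map (fun _ => pvInitCell)

-- row r after its first j cells have been finalized
def mrow (rows cols r j : Int) : List (List (String × String)) :=
  (PySem.List.pyRange 0 cols 1).map (fun c => if c < j then fcell rows cols r c else pvInitCell)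

theorem alt_eq (rows cols : Int) :
    define_edges_alt rows cols =
      (PySem.List.pyRange 0 rows 1).map (fun r => frow rows cols r) := rfl

theorem mrow_zero (rows cols r : Int) : mrow rows cols r 0 = irow cols := by
  unfold mrow irow
  refine List.map_congr_left (fun c hc => ?_)
  rw [PySem.List.mem_pyRange_one] at hc
  simp [show ¬ c < 0 by omega]

theorem mrow_full (rows cols r j : Int) (hj : cols ≤ j) :
    mrow rows cols r j = frow rows cols r := by
  unfold mrow frow
  refine List.map_congr_left (fun c hc => ?_)
  rw [PySem.List.mem_pyRange_one] at hc
  simp [show c < j by omega]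

theorem length_mrow (rows cols r j : Int) : (mrow rows cols r j).length = (cols - 0).toNat := by
  simp [mrow, PySem.List.length_pyRange_one]

theorem pyGetD_append_cons {α : Type} (F : List α) (x : α) (T : List α) (r : Int) (d : α)
    (h : r = (F.length : Int)) :
    PySem.List.pyGetD (F ++ x :: T) r d = x := by
  subst h
  rw [PySem.List.pyGetD_natCast]
  induction F with
  | nil => rfl
  | cons y F ih => simpa using ih

theorem pySetD_append_cons {α : Type} (F : List α) (x y : α) (T : List α) (r : Int)
    (h : r = (F.length : Int)) :
    PySem.List.pySetD (F ++ x :: T) r y = F ++ y :: T := by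
  subst h
  rw [PySem.List.pySetD_natCast]
  induction F with
  | nil => rfl
  | cons z F ih => simpa using ih

theorem pyGetD_append_left {α : Type} (F T : List α) (k : Nat) (d : α)
    (h : k < F.length) :
    PySem.List.pyGetD (F ++ T) (k : Int) d = PySem.List.pyGetD F (k : Int) d := by
  rw [PySem.List.pyGetD_natCast, PySem.List.pyGetD_natCast]
  induction F generalizing k with
  | nil => simp at h
  | cons y F ih =>
    cases k with
    | zero => rfl
    | succ m => simpa using ih m (by simpa using h)

-- writing the closed-form cell into the mixed row advances the frontier by one
theorem mrow_set (rows cols r : Int) (n : Nat) (hn : (n : Int) < cols) :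
    List.set (mrow rows cols r (n : Int)) n (fcell rows cols r (n : Int)) =
      mrow rows cols r ((n : Int) + 1) := by
  unfold mrow
  apply List.ext_getElem
  · simp
  · intro i h1 h2
    simp only [List.getElem_set, List.getElem_map, PySem.List.getElem_pyRange_one, zero_add]
    by_cases hin : n = i
    · subst hin
      simp [show ((n : Int)) < (n : Int) + 1 by omega]
    · have hii : ((i : Int) < (n : Int)) ↔ ((i : Int) < (n : Int) + 1) := by
        constructor <;> intro h <;> omega
      simp only [if_neg hin]
      by_cases hlt : (i : Int) < (n : Int)
      · simp [hlt, hii.mp hlt]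
      · simp [hlt, show ¬ ((i : Int) < (n : Int) + 1) by omega]

theorem cellStep_mixed (rows cols r : Int) (hr0 : 0 ≤ r) (hr : r < rows) (n : Nat)
    (hn : (n : Int) < cols) (T : List (List (List (String × String)))) :
    pvCellStep rows cols
        ((PySem.List.pyRange 0 r 1).map (frow rows cols) ++ mrow rows cols r (n : Int) :: T) r (n : Int) =
      (PySem.List.pyRange 0 r 1).map (frow rows cols) ++ mrow rows cols r ((n : Int) + 1) :: T := by
  have hF : r = (((PySem.List.pyRange 0 r 1).map (frow rows cols)).length : Int) := by
    rw [List.length_map, PySem.List.length_pyRange_one]; omega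
  have hget : ∀ (x : List (List (String × String))) (Tl : List (List (List (String × String)))),
      PySem.List.pyGetD ((PySem.List.pyRange 0 r 1).map (frow rows cols) ++ x :: Tl) r [] = x :=
    fun x Tl => pyGetD_append_cons _ _ _ _ _ hF
  have hset : ∀ (x y : List (List (String × String))) (Tl : List (List (List (String × String)))),
      PySem.List.pySetD ((PySem.List.pyRange 0 r 1).map (frow rows cols) ++ x :: Tl) r y =
        (PySem.List.pyRange 0 r 1).map (frow rows cols) ++ y :: Tl :=
    fun x y Tl => pySetD_append_cons _ _ _ _ _ hF
  have hnl : n < (mrow rows cols r (n : Int)).length := by rw [length_mrow]; omega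
  -- reading the not-yet-finalized cell (r, n) gives the initial cell
  have hc0 : PySem.List.pyGetD (mrow rows cols r (n : Int)) (n : Int) [] = pvInitCell := by
    unfold mrow
    rw [PySem.List.pyGetD_map_pyRange_of_nonneg _ _ _ _ (by omega) (by omega)]
    simp
  -- value stored into "top"
  have htopv :
      (if r > 0 then
          opposite_edge (pvDget (PySem.List.pyGetD (PySem.List.pyGetD
            ((PySem.List.pyRange 0 r 1).map (frow rows cols) ++ mrow rows cols r (n : Int) :: T)
            (r - 1) []) (n : Int) []) "bottom")
        else "none") = (if r > 0 then "in" else "none") := by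
    by_cases h1 : r > 0
    · have hrow : PySem.List.pyGetD
          ((PySem.List.pyRange 0 r 1).map (frow rows cols) ++ mrow rows cols r (n : Int) :: T)
          (r - 1) [] = frow rows cols (r - 1) := by
        have h2 : r - 1 = ((r - 1).toNat : Int) := by omega
        rw [h2, pyGetD_append_left _ _ _ _ (by rw [List.length_map, PySem.List.length_pyRange_one]; omega),
            ← h2]
        exact PySem.List.pyGetD_map_pyRange_of_nonneg _ _ _ _ (by omega) (by omega)
      rw [hrow]
      have hcellv : PySem.List.pyGetD (frow rows cols (r - 1)) (n : Int) [] =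
          fcell rows cols (r - 1) (n : Int) := by
        unfold frow
        exact PySem.List.pyGetD_map_pyRange_of_nonneg _ _ _ _ (by omega) (by omega)
      rw [hcellv]
      simp [pvDget, fcell, PySem.Dict.get?_mk_cons, h1,
        show r - 1 < rows - 1 by omega, opposite_edge]
    · simp [h1]
  simp only [pvCellStep, pvGetCell, pvSetCell, hget, hset]
  congr 1
  rw [htopv]
  congr 1
  -- collapse the chained writes and re-reads of cell (r, n)
  simp only [PySem.List.pySetD_natCast]
  have hgs : ∀ (c : List (String × String)),
      PySem.List.pyGetD (List.set (mrow rows cols r (n : Int)) n c) (n : Int) [] = c := by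
    intro c
    rw [PySem.List.pyGetD_natCast, List.getD_eq_getElem _ _ (by rw [List.length_set]; exact hnl)]
    simp
  simp only [List.set_set, hgs, hc0]
  -- the "left" read (only when n > 0) sees the already-final cell (r, n - 1)
  by_cases h2 : (n : Int) > 0
  · have hleft : ∀ (c : List (String × String)),
        PySem.List.pyGetD (List.set (mrow rows cols r (n : Int)) n c) ((n : Int) - 1) [] =
          fcell rows cols r ((n : Int) - 1) := by
      intro c
      have he : ((n : Int)) - 1 = ((n - 1 : Nat) : Int) := by omega
      rw [he, PySem.List.pyGetD_natCast,
          List.getD_eq_getElem _ _ (by rw [List.length_set]; omega),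
          List.getElem_set, if_neg (by omega)]
      simp only [mrow, List.getElem_map, PySem.List.getElem_pyRange_one, zero_add]
      rw [if_pos (by omega), ← he]
    simp only [if_pos h2, hleft]
    have hlv : pvDget (fcell rows cols r ((n : Int) - 1)) "right" = "out" := by
      simp [pvDget, fcell, PySem.Dict.get?_mk_cons, show (n : Int) - 1 < cols - 1 by omega]
    rw [hlv]
    show List.set (mrow rows cols r (n : Int)) n
        (pvDset (pvDset (pvDset (pvDset pvInitCell "top" _) "left" _) "right" _) "bottom" _) = _
    rw [show pvDset (pvDset (pvDset (pvDset pvInitCell "top" (if r > 0 then "in" else "none"))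
          "left" (opposite_edge "out")) "right" (if (n : Int) < cols - 1 then "out" else "none"))
          "bottom" (if r < rows - 1 then "out" else "none") = fcell rows cols r (n : Int) by
        simp [pvDset, pvInitCell, fcell, PySem.Dict.insert, opposite_edge, h2] <;> omega]
    exact mrow_set rows cols r n hn
  · simp only [if_neg h2]
    rw [show pvDset (pvDset (pvDset (pvDset pvInitCell "top" (if r > 0 then "in" else "none"))
          "left" "none") "right" (if (n : Int) < cols - 1 then "out" else "none"))
          "bottom" (if r < rows - 1 then "out" else "none") = fcell rows cols r (n : Int) by
        simp [pvDset, pvInitCell, fcell, PySem.Dict.insert, h2] <;> omega]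
    exact mrow_set rows cols r n hn

theorem inner_fold (rows cols r : Int) (hr0 : 0 ≤ r) (hr : r < rows)
    (T : List (List (List (String × String)))) (n : Nat) :
    (n : Int) ≤ cols →
    (PySem.List.pyRange 0 (n : Int) 1).foldl (fun g c => pvCellStep rows cols g r c)
        ((PySem.List.pyRange 0 r 1).map (frow rows cols) ++ mrow rows cols r 0 :: T) =
      (PySem.List.pyRange 0 r 1).map (frow rows cols) ++ mrow rows cols r (n : Int) :: T := by
  induction n with
  | zero =>
    intro _
    rw [show PySem.List.pyRange 0 ((0:Nat):Int) 1 = [] from PySem.List.pyRange_one_eq_nil (by omega)]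
    rfl
  | succ m ih =>
    intro hn
    have hm1 : ((m + 1 : Nat) : Int) = (m : Int) + 1 := by push_cast; ring
    have hn' : (m : Int) + 1 ≤ cols := by omega
    have hm : (m : Int) ≤ cols := by omega
    have hmc : (m : Int) < cols := by omega
    rw [hm1, show PySem.List.pyRange 0 ((m:Int)+1) 1 = PySem.List.pyRange 0 (m:Int) 1 ++ [(m:Int)]
          from PySem.List.pyRange_one_succ_right (by omega), List.foldl_append, ih hm]
    simp only [List.foldl_cons, List.foldl_nil]
    exact cellStep_mixed rows cols r hr0 hr m hmc T

theorem row_fold (rows cols r : Int) (hr0 : 0 ≤ r) (hr : r < rows)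
    (T : List (List (List (String × String)))) :
    (PySem.List.pyRange 0 cols 1).foldl (fun g c => pvCellStep rows cols g r c)
        ((PySem.List.pyRange 0 r 1).map (frow rows cols) ++ irow cols :: T) =
      (PySem.List.pyRange 0 r 1).map (frow rows cols) ++ frow rows cols r :: T := by
  by_cases hc : 0 ≤ cols
  · have h1 := inner_fold rows cols r hr0 hr T cols.toNat (by omega)
    rw [show ((cols.toNat : Int)) = cols by omega] at h1
    rw [← mrow_zero rows cols r, h1, mrow_full rows cols r cols le_rfl]
  · rw [PySem.List.pyRange_one_eq_nil (by omega : cols ≤ 0), List.foldl_nil]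
    have h1 : irow cols = [] := by
      unfold irow; rw [PySem.List.pyRange_one_eq_nil (by omega : cols ≤ 0)]; rfl
    have h2 : frow rows cols r = [] := by
      unfold frow; rw [PySem.List.pyRange_one_eq_nil (by omega : cols ≤ 0)]; rfl
    rw [h1, h2]

theorem outer_fold (rows cols : Int) (k : Nat) :
    (k : Int) ≤ rows →
    (PySem.List.pyRange 0 (k : Int) 1).foldl (fun g r =>
        (PySem.List.pyRange 0 cols 1).foldl (fun g c => pvCellStep rows cols g r c) g)
        ((PySem.List.pyRange 0 rows 1).map (fun _ => irow cols)) =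
      (PySem.List.pyRange 0 (k : Int) 1).map (frow rows cols) ++
        (PySem.List.pyRange (k : Int) rows 1).map (fun _ => irow cols) := by
  induction k with
  | zero =>
    intro _
    rw [show PySem.List.pyRange 0 ((0:Nat):Int) 1 = [] from PySem.List.pyRange_one_eq_nil (by omega)]
    simp
  | succ m ih =>
    intro hk
    have hm1 : ((m + 1 : Nat) : Int) = (m : Int) + 1 := by push_cast; ring
    have hm : (m : Int) ≤ rows := by omega
    have hmr : (m : Int) < rows := by omega
    rw [hm1, show PySem.List.pyRange 0 ((m:Int)+1) 1 = PySem.List.pyRange 0 (m:Int) 1 ++ [(m:Int)]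
          from PySem.List.pyRange_one_succ_right (by omega), List.foldl_append, ih hm]
    simp only [List.foldl_cons, List.foldl_nil]
    rw [PySem.List.pyRange_one_cons hmr]
    rw [List.map_cons, row_fold rows cols m (by omega) hmr]
    simp

theorem define_edges_eq_alt (rows cols : Int) :
    define_edges rows cols = define_edges_alt rows cols := by
  unfold define_edges
  rw [alt_eq]
  by_cases hr : 0 ≤ rows
  · have h1 := outer_fold rows cols rows.toNat (by omega)
    rw [show ((rows.toNat : Int)) = rows by omega] at h1
    rw [show ((PySem.List.pyRange 0 rows 1).map (fun _ => (PySem.List.pyRange 0 cols 1).map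
          (fun _ => pvInitCell))) = ((PySem.List.pyRange 0 rows 1).map (fun _ => irow cols)) from rfl,
        h1, PySem.List.pyRange_one_eq_nil (le_refl rows)]
    simp [frow]
  · rw [PySem.List.pyRange_one_eq_nil (by omega : rows ≤ 0)]
    simp

-- ===== VERDICT (by name: the statement is the Claim_ definition above) =====
theorem define_edges_spec : Claim_equal_define_edges := by
  intro rows cols _
  unfold Spec_define_edges
  exact define_edges_eq_alt rows cols
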